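-- pv_equiv track=rewrite | github.com/solomka385/obezlichivanie | project_for_danniy/get_group.py | fam_gr
-- ===== SOURCE A (Python) =====
-- def fam_gr(popularity):
--     groups = {1: (40000, 10**10),
--             2: (20000, 40000),
--             3: (10000, 20000),
--             4: (5000, 10000),
--             5: (0, 5000)}
--     for i in range(1, len(groups)+1):
--         lower, upper = groups[i]
--         if lower <= popularity < upper:
--             return i
-- ===== SOURCE B (Python) =====
-- import bisect
--
-- _THRESHOLDS = [5000, 10000, 20000, 40000]
--
-- def fam_gr(popularity):
--     if popularity < 0 or popularity >= 10**10:
--         return None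
--     return 5 - bisect.bisect_right(_THRESHOLDS, popularity)
-- ===== Notes on version B (the rewrite author's own statement) =====
-- stated objective: idiomatic
-- what changed: Replaced the dict of five ranges scanned linearly with a sorted threshold table and a single bisect_right giving group = 5 - insertion point.
import Mathlib
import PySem

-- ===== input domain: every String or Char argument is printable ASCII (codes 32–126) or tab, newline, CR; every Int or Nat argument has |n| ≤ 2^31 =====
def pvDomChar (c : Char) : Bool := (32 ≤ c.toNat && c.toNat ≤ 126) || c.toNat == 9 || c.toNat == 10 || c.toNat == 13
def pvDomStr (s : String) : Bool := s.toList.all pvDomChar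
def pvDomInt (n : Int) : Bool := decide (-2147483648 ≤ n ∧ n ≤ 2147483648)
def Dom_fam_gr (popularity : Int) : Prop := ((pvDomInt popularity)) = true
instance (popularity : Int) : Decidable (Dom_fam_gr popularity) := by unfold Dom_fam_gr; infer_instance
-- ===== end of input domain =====

-- B replaces A's dict of five ranges scanned linearly with a sorted threshold table
-- queried by one bisect_right (idiomatic; same exact values, including None out of range).

-- ===== PORT A =====
def fam_gr (popularity : Int) : Option Int :=
  let groups : PySem.Dict Int (Int × Int) :=
    (((((PySem.Dict.empty.insert 1 (40000, 10000000000)).insert 2 (20000, 40000)).insert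
        3 (10000, 20000)).insert 4 (5000, 10000)).insert 5 (0, 5000))
  (PySem.List.pyRange 1 ((groups.size : Int) + 1) 1).foldl
    (fun acc i =>
      match acc with
      | some r => some r
      | none =>
        match groups.get? i with
        | some (lower, upper) =>
            if lower ≤ popularity ∧ popularity < upper then some i else none
        | none => none)  -- unreachable: every i in range(1, len(groups)+1) is a key
    none

-- ===== PORT B =====
def pvThresholds : List Int := [5000, 10000, 20000, 40000]

def fam_gr_alt (popularity : Int) : Option Int :=
  if popularity < 0 ∨ popularity ≥ 10000000000 then none
  else some (5 - (PySem.List.bisectRight pvThresholds popularity : Int))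

-- ===== PRECONDITION & SPEC =====
def Spec_fam_gr (popularity : Int) (out : Option Int) : Prop := out = fam_gr_alt popularity
instance (popularity : Int) (out : Option Int) : Decidable (Spec_fam_gr popularity out) := by unfold Spec_fam_gr; infer_instance

-- ===== CLAIM (what is proved, stated in full; the proofs are below) =====
def Claim_equal_fam_gr : Prop := ∀ (popularity : Int), Dom_fam_gr popularity → Spec_fam_gr popularity (fam_gr popularity)

-- ===== LEMMAS AND PROOFS =====

-- A's range scan, characterised as one nested-if case split on popularity.
theorem fam_gr_cases (q : Int) : fam_gr q =
    (if 40000 ≤ q ∧ q < 10000000000 then some 1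
     else if 20000 ≤ q ∧ q < 40000 then some 2
     else if 10000 ≤ q ∧ q < 20000 then some 3
     else if 5000 ≤ q ∧ q < 10000 then some 4
     else if 0 ≤ q ∧ q < 5000 then some 5 else none) := by
  unfold fam_gr
  norm_num [PySem.List.pyRange, PySem.Dict.size, PySem.Dict.insert, PySem.Dict.empty,
    PySem.Dict.get?, PySem.Dict.items, List.foldl, Int.toNat,
    List.range, List.range.loop, List.map, List.find?]
  split_ifs <;> first | rfl | omega |
    (simp only [Int.reduceBEq, Option.map]; split_ifs <;> first | rfl | omega)

-- B's bisect over the threshold table, characterised as the same case split.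
theorem fam_gr_alt_cases (q : Int) : fam_gr_alt q =
    (if 40000 ≤ q ∧ q < 10000000000 then some 1
     else if 20000 ≤ q ∧ q < 40000 then some 2
     else if 10000 ≤ q ∧ q < 20000 then some 3
     else if 5000 ≤ q ∧ q < 10000 then some 4
     else if 0 ≤ q ∧ q < 5000 then some 5 else none) := by
  unfold fam_gr_alt pvThresholds
  simp [PySem.List.bisectRight, PySem.List.bisectRightLoop]
  split_ifs <;> first | rfl | omega | simp_all <;> omega

-- ===== VERDICT (by name: the statement is the Claim_ definition above) =====
theorem fam_gr_spec : Claim_equal_fam_gr := by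
  intro p _
  unfold Spec_fam_gr
  rw [fam_gr_cases, fam_gr_alt_cases]
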